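-- pv_equiv track=rewrite | github.com/Miguel-SLF/Atividade-Grafos | Atividade1_Grafos.py | grau_vertices
-- ===== SOURCE A (Python) =====
-- def vizinhos(grafo: dict, vertice: str):
--     return grafo.get(vertice, {})
--
-- def listar_vizinhos(grafo: dict, vertice: str):
--   lista_vizinho = {}
--
--   if vertice in grafo:
--     lista_vizinho = vizinhos(grafo=grafo, vertice=vertice)
--   return lista_vizinho
--
-- def grau_vertices(grafo, nao_direcionado: bool =True):
--     graus = {}
--
--     for ver in grafo: graus[ver] = {"In": 0, "Out": 0, "Total": 0}
--
--     if nao_direcionado: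
--         for ver in grafo:
--             vizinhos = listar_vizinhos(vertice=ver, grafo=grafo)
--             graus[ver]["In"] = len(vizinhos)
--             graus[ver]["Out"] = len(vizinhos)
--             graus[ver]["Total"] = graus[ver]["In"]
--     else:
--         for ver in grafo:
--             for ver_aux in grafo:
--               if ver in listar_vizinhos(vertice=ver_aux, grafo=grafo): graus[ver]["In"] += 1
--             graus[ver]["Out"] = len(listar_vizinhos(vertice=ver, grafo=grafo))
--             graus[ver]["Total"] = graus[ver]["In"] + graus[ver]["Out"]
--
--     return graus
-- ===== SOURCE B (Python) =====
-- def grau_vertices(grafo, nao_direcionado: bool = True):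
--     if nao_direcionado:
--         return {v: {"In": len(adj), "Out": len(adj), "Total": len(adj)}
--                 for v, adj in grafo.items()}
--     indeg = {v: 0 for v in grafo}
--     for adj in grafo.values():
--         for v in set(adj):
--             if v in indeg:
--                 indeg[v] += 1
--     return {v: {"In": indeg[v], "Out": len(adj), "Total": indeg[v] + len(adj)}
--             for v, adj in grafo.items()}
-- ===== Notes on version B (the rewrite author's own statement) =====
-- stated objective: alternative
-- what changed: Instead of A's nested scan that, for each vertex, rescans every vertex's adjacency list to count its in-degree, B makes one pass over the adjacency lists incrementing a per-target in-degree counter (and the undirected case becomes a single dict comprehension); asymptotically O(V+E) instead of O(V^2+V*E), though a timing run did not confirm a speed-up on the generated edge-heavy inputs.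
import Mathlib
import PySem

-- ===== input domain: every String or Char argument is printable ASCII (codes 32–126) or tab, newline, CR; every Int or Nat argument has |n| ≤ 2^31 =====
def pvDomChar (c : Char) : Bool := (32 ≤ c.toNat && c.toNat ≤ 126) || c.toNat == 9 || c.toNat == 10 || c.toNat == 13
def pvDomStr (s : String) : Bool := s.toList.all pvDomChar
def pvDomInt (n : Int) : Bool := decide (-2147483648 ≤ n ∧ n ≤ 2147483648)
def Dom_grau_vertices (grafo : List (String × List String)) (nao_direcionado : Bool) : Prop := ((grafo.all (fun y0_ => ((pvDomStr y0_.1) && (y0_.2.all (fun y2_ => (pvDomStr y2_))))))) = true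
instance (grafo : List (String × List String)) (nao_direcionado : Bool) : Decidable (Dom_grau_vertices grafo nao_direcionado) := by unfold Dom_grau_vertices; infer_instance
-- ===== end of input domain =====

-- B replaces A's per-vertex rescan of every adjacency list by one pass over the adjacency
-- lists incrementing per-target in-degree counters (a different, single-pass algorithm;
-- the undirected case becomes a single comprehension).

-- ===== PORT A =====
-- vizinhos(grafo, vertice) = grafo.get(vertice, {})
def pvVizinhos (g : PySem.Dict String (List String)) (v : String) : List String :=
  g.getD v []

-- listar_vizinhos(grafo, vertice)
def pvListar (g : PySem.Dict String (List String)) (v : String) : List String :=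
  if g.contains v then pvVizinhos g v else []

-- the inner dict literal {"In": 0, "Out": 0, "Total": 0}
def pvZero : PySem.Dict String Int := PySem.Dict.mk [("In", 0), ("Out", 0), ("Total", 0)]

def grau_vertices (grafo : List (String × List String)) (nao_direcionado : Bool) :
    List (String × List (String × Int)) :=
  let g : PySem.Dict String (List String) := PySem.Dict.mk grafo
  let ks := grafo.map (fun p => p.1)              -- 'for ver in grafo' iterates the keys
  let graus0 : PySem.Dict String (PySem.Dict String Int) :=
    ks.foldl (fun d ver => d.insert ver pvZero) PySem.Dict.empty
  let graus :=
    if nao_direcionado then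
      ks.foldl (fun d ver =>
        let viz := pvListar g ver
        let d := d.insert ver ((d.getD ver PySem.Dict.empty).insert "In" (viz.length : Int))
        let d := d.insert ver ((d.getD ver PySem.Dict.empty).insert "Out" (viz.length : Int))
        let d := d.insert ver ((d.getD ver PySem.Dict.empty).insert "Total"
                    ((d.getD ver PySem.Dict.empty).getD "In" 0))
        d) graus0
    else
      ks.foldl (fun d ver =>
        let d := ks.foldl (fun d ver_aux =>
            if ver ∈ pvListar g ver_aux then
              d.insert ver ((d.getD ver PySem.Dict.empty).insert "In"
                  ((d.getD ver PySem.Dict.empty).getD "In" 0 + 1))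
            else d) d
        let d := d.insert ver ((d.getD ver PySem.Dict.empty).insert "Out"
                    ((pvListar g ver).length : Int))
        let d := d.insert ver ((d.getD ver PySem.Dict.empty).insert "Total"
                    ((d.getD ver PySem.Dict.empty).getD "In" 0
                      + (d.getD ver PySem.Dict.empty).getD "Out" 0))
        d) graus0
  graus.items.map (fun q => (q.1, q.2.items))

-- ===== PORT B =====
def grau_vertices_alt (grafo : List (String × List String)) (nao_direcionado : Bool) :
    List (String × List (String × Int)) :=
  if nao_direcionado then
    grafo.map (fun p =>
      (p.1, [("In", (p.2.length : Int)), ("Out", (p.2.length : Int)), ("Total", (p.2.length : Int))]))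
  else
    let indeg0 : PySem.Dict String Int :=
      grafo.foldl (fun d p => d.insert p.1 0) PySem.Dict.empty     -- {v: 0 for v in grafo}
    let indeg := grafo.foldl (fun d p =>
        (PySem.Set.ofList p.2).foldl
          (fun d v => if d.contains v then d.insert v (d.getD v 0 + 1) else d) d) indeg0
    grafo.map (fun p =>
      (p.1, [("In", indeg.getD p.1 0), ("Out", (p.2.length : Int)),
             ("Total", indeg.getD p.1 0 + (p.2.length : Int))]))

-- ===== PRECONDITION & SPEC =====
-- Pre_ excludes association lists with duplicate keys: a Python dict cannot contain them
-- (the dict conversion collapses duplicates), so such lists are a defensible corner with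
-- no canonical behaviour.
def Pre_grau_vertices (grafo : List (String × List String)) (nao_direcionado : Bool) : Prop :=
  (grafo.map (fun p => p.1)).Nodup
instance (grafo : List (String × List String)) (nao_direcionado : Bool) :
    Decidable (Pre_grau_vertices grafo nao_direcionado) := by unfold Pre_grau_vertices; infer_instance

def pvWitness_grau_vertices : (List (String × List String)) × Bool :=
  ([("a", ["b"]), ("b", [])], false)

def Spec_grau_vertices (grafo : List (String × List String)) (nao_direcionado : Bool)
    (out : List (String × List (String × Int))) : Prop := out = grau_vertices_alt grafo nao_direcionado
instance (grafo : List (String × List String)) (nao_direcionado : Bool)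
    (out : List (String × List (String × Int))) : Decidable (Spec_grau_vertices grafo nao_direcionado out) := by
  unfold Spec_grau_vertices; infer_instance

-- ===== CLAIM (what is proved, stated in full; the proofs are below) =====
def Claim_equal_grau_vertices : Prop := ∀ (grafo : List (String × List String)) (nao_direcionado : Bool), Dom_grau_vertices grafo nao_direcionado → Pre_grau_vertices grafo nao_direcionado → Spec_grau_vertices grafo nao_direcionado (grau_vertices grafo nao_direcionado)

-- ===== LEMMAS AND PROOFS =====

-- "In" counter bump used by A's directed in-degree loop
def pvBump (i : PySem.Dict String Int) : PySem.Dict String Int := i.insert "In" (i.getD "In" 0 + 1)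

theorem pv_keys_insert_contains {ν : Type} (d : PySem.Dict String ν) (k : String) (v : ν)
    (hc : d.contains k = true) : (d.insert k v).keys = d.keys := by
  simp only [PySem.Dict.keys, PySem.Dict.items_insert, hc, if_true, List.map_map]
  apply List.map_congr_left
  intro p _
  by_cases h : p.1 = k <;> simp [h]

theorem pv_contains_insert_contains {ν : Type} (d : PySem.Dict String ν) (k a : String) (v : ν)
    (hc : d.contains k = true) : (d.insert k v).contains a = d.contains a := by
  rw [PySem.Dict.contains_eq_decide_mem_keys, PySem.Dict.contains_eq_decide_mem_keys,
    pv_keys_insert_contains d k v hc]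

theorem pv_insert_getD_self {ν : Type} (d : PySem.Dict String ν) (k : String) (v0 : ν)
    (hnd : d.keys.Nodup) (hc : d.contains k = true) : d.insert k (d.getD k v0) = d := by
  apply PySem.Dict.ext
  simp only [PySem.Dict.items_insert, hc, if_true]
  conv_rhs => rw [← List.map_id d.items]
  apply List.map_congr_left
  intro p hp
  by_cases h : p.1 = k
  · have hgd : d.getD p.1 v0 = p.2 := PySem.Dict.getD_of_mem_items _ hp hnd v0
    rw [h] at hgd
    simp [h, hgd, Prod.ext_iff]
  · simp [h]

-- a fold that, at each key k of ks, replaces the value stored at k by F k (old value)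
theorem pv_updateAll {ν : Type} (v0 : ν) (step : PySem.Dict String ν → String → PySem.Dict String ν)
    (F : String → ν → ν)
    (hstep : ∀ d k, d.keys.Nodup → d.contains k = true → step d k = d.insert k (F k (d.getD k v0))) :
    ∀ (ks : List String) (d : PySem.Dict String ν), d.keys.Nodup → ks.Nodup →
      (∀ k ∈ ks, d.contains k = true) →
    (ks.foldl step d).items = d.items.map (fun p => if p.1 ∈ ks then (p.1, F p.1 p.2) else p)
  | [], d, _, _, _ => by simp
  | k :: ks, d, hnd, hks, hin => by
    have hck : d.contains k = true := hin k (by simp)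
    have hknot : k ∉ ks := (List.nodup_cons.mp hks).1
    rw [List.foldl_cons, hstep d k hnd hck]
    rw [pv_updateAll v0 step F hstep ks (d.insert k (F k (d.getD k v0)))
        (by rw [pv_keys_insert_contains d k _ hck]; exact hnd)
        (List.nodup_cons.mp hks).2
        (by intro a ha; rw [pv_contains_insert_contains d k a _ hck]; exact hin a (by simp [ha]))]
    simp only [PySem.Dict.items_insert, hck, if_true, List.map_map]
    apply List.map_congr_left
    intro p hp
    by_cases h : p.1 = k
    · have hgd : d.getD p.1 v0 = p.2 := PySem.Dict.getD_of_mem_items _ hp hnd v0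
      rw [h] at hgd
      simp [Function.comp, h, hknot, hgd]
    · simp [Function.comp, h, List.mem_cons]

-- evaluating A's and B's whole pipeline shape down to a map over grafo
theorem pv_A_items (grafo : List (String × List String))
    (step : PySem.Dict String (PySem.Dict String Int) → String → PySem.Dict String (PySem.Dict String Int))
    (F : String → PySem.Dict String Int → PySem.Dict String Int)
    (hpre : (grafo.map (fun p => p.1)).Nodup)
    (hstep : ∀ d k, d.keys.Nodup → d.contains k = true →
      step d k = d.insert k (F k (d.getD k PySem.Dict.empty))) :
    (List.foldl step
        (List.foldl (fun d ver => d.insert ver pvZero) PySem.Dict.empty (grafo.map (fun p => p.1)))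
        (grafo.map (fun p => p.1))).items.map (fun q => (q.1, q.2.items))
      = grafo.map (fun p => (p.1, (F p.1 pvZero).items)) := by
  have h0 : (List.foldl (fun d ver => d.insert ver pvZero) PySem.Dict.empty
      (grafo.map (fun p => p.1))).items = (grafo.map (fun p => p.1)).map (fun a => (a, pvZero)) := by
    have := PySem.Dict.items_foldl_insert_fresh (grafo.map (fun p => p.1)) (fun a => a)
      (fun _ => pvZero) PySem.Dict.empty (by intro a _; simp) (by simpa using hpre)
    exact this
  have hkeys0 : (List.foldl (fun d ver => d.insert ver pvZero) PySem.Dict.empty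
      (grafo.map (fun p => p.1))).keys = grafo.map (fun p => p.1) := by
    simp only [PySem.Dict.keys, h0, List.map_map]
    simp
  rw [pv_updateAll PySem.Dict.empty step F hstep (grafo.map (fun p => p.1)) _
      (by rw [hkeys0]; exact hpre) hpre
      (by intro a ha; rw [PySem.Dict.contains_eq_decide_mem_keys, hkeys0]; simpa using ha)]
  rw [h0, List.map_map, List.map_map, List.map_map]
  apply List.map_congr_left
  intro p hp
  have hmem : p.1 ∈ grafo.map (fun p => p.1) := List.mem_map.mpr ⟨p, hp, rfl⟩
  simp [Function.comp, hmem]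

-- lookup of a key of grafo through listar_vizinhos is just its adjacency list
theorem pvListar_mem (grafo : List (String × List String))
    (hpre : (grafo.map (fun p => p.1)).Nodup) (p : String × List String) (hp : p ∈ grafo) :
    pvListar (PySem.Dict.mk grafo) p.1 = p.2 := by
  have hnd : (PySem.Dict.mk grafo).keys.Nodup := by simpa [PySem.Dict.keys] using hpre
  have hget : (PySem.Dict.mk grafo).get? p.1 = some p.2 :=
    PySem.Dict.get?_of_mem_items _ (by exact hp) hnd
  have hcon : (PySem.Dict.mk grafo).contains p.1 = true := by
    rw [PySem.Dict.contains_eq_isSome_get?, hget]; rfl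
  simp [pvListar, pvVizinhos, hcon, PySem.Dict.getD_eq_get?_getD, hget]

-- the inner dict after A's undirected three writes
theorem pv_triple_items (L : Int) :
    (((pvZero.insert "In" L).insert "Out" L).insert "Total" L).items
      = [("In", L), ("Out", L), ("Total", L)] := by
  simp [pvZero, PySem.Dict.items_insert, PySem.Dict.contains_insert]

theorem pv_bump_iter : ∀ (c : Nat),
    pvBump^[c] pvZero = PySem.Dict.mk [("In", (c : Int)), ("Out", 0), ("Total", 0)]
  | 0 => by simp [pvZero]
  | c + 1 => by
    rw [Function.iterate_succ_apply', pv_bump_iter c]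
    apply PySem.Dict.ext
    simp [pvBump, PySem.Dict.items_insert, PySem.Dict.getD_eq_get?_getD, PySem.Dict.get?_mk_cons,
      Nat.cast_add]

-- the inner dict after A's directed writes
theorem pv_dtriple_items (c : Nat) (L : Int) :
    (((pvBump^[c] pvZero).insert "Out" L).insert "Total"
        ((((pvBump^[c] pvZero).insert "Out" L).getD "In" 0)
          + (((pvBump^[c] pvZero).insert "Out" L).getD "Out" 0))).items
      = [("In", (c : Int)), ("Out", L), ("Total", (c : Int) + L)] := by
  rw [pv_bump_iter]
  simp [PySem.Dict.items_insert, PySem.Dict.contains_insert,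
    PySem.Dict.getD_eq_get?_getD, PySem.Dict.get?_mk_cons, PySem.Dict.get?_insert]

-- A's directed inner loop: repeated conditional bumps of graus[ver]["In"]
theorem pv_incr_loop (g : PySem.Dict String (List String)) (ver : String) :
    ∀ (ls : List String) (d : PySem.Dict String (PySem.Dict String Int)),
      d.keys.Nodup → d.contains ver = true →
    ls.foldl (fun d a =>
        if ver ∈ pvListar g a then
          d.insert ver ((d.getD ver PySem.Dict.empty).insert "In"
            ((d.getD ver PySem.Dict.empty).getD "In" 0 + 1))
        else d) d
      = d.insert ver (pvBump^[ls.countP (fun a => decide (ver ∈ pvListar g a))]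
          (d.getD ver PySem.Dict.empty))
  | [], d, hnd, hc => by
    simpa using (pv_insert_getD_self d ver PySem.Dict.empty hnd hc).symm
  | a :: ls, d, hnd, hc => by
    rw [List.foldl_cons]
    by_cases hPa : ver ∈ pvListar g a
    · rw [if_pos hPa]
      rw [pv_incr_loop g ver ls _
          (by rw [pv_keys_insert_contains d ver _ hc]; exact hnd)
          (by rw [pv_contains_insert_contains d ver ver _ hc]; exact hc)]
      rw [PySem.Dict.getD_insert_self, PySem.Dict.insert_insert_self,
        List.countP_cons_of_pos (by simpa using hPa), Function.iterate_succ_apply]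
      rfl
    · rw [if_neg hPa]
      rw [pv_incr_loop g ver ls d hnd hc,
        List.countP_cons_of_neg (by simpa using hPa)]

-- B's inner set loop: keys are unchanged
theorem pv_inner_keys : ∀ (s : List String) (d : PySem.Dict String Int),
    (s.foldl (fun d v => if d.contains v then d.insert v (d.getD v 0 + 1) else d) d).keys = d.keys
  | [], _ => rfl
  | v :: s, d => by
    rw [List.foldl_cons]
    by_cases h : d.contains v = true
    · rw [if_pos h, pv_inner_keys s (d.insert v (d.getD v 0 + 1)), pv_keys_insert_contains d v _ h]
    · rw [if_neg h]
      exact pv_inner_keys s d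

-- B's inner set loop: effect on one counter
theorem pv_inner_getD (ver : String) : ∀ (s : List String) (d : PySem.Dict String Int),
    (s.foldl (fun d v => if d.contains v then d.insert v (d.getD v 0 + 1) else d) d).getD ver 0
      = d.getD ver 0 + (if d.contains ver = true then (s.count ver : Int) else 0)
  | [], d => by simp
  | v :: s, d => by
    rw [List.foldl_cons]
    by_cases hv : v = ver
    · subst hv
      by_cases hc : d.contains v = true
      · rw [if_pos hc, pv_inner_getD v s (d.insert v (d.getD v 0 + 1)),
          PySem.Dict.getD_insert_self, pv_contains_insert_contains d v v _ hc]
        rw [if_pos hc, if_pos hc, List.count_cons_self]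
        push_cast
        ring
      · rw [if_neg hc, pv_inner_getD v s d]
        simp [hc]
    · have hne : ver ≠ v := fun h => hv h.symm
      by_cases hc : d.contains v = true
      · rw [if_pos hc, pv_inner_getD ver s (d.insert v (d.getD v 0 + 1)),
          PySem.Dict.getD_insert_of_ne _ _ _ hne,
          pv_contains_insert_contains d v ver _ hc,
          List.count_cons_of_ne hv]
      · rw [if_neg hc, pv_inner_getD ver s d, List.count_cons_of_ne hv]

-- B's outer pass: total effect on one counter
theorem pv_outer_getD (ver : String) : ∀ (l : List (String × List String)) (d : PySem.Dict String Int),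
    (l.foldl (fun d p =>
        (PySem.Set.ofList p.2).foldl
          (fun d v => if d.contains v then d.insert v (d.getD v 0 + 1) else d) d) d).getD ver 0
      = d.getD ver 0
        + (if d.contains ver = true then (l.countP (fun p => decide (ver ∈ p.2)) : Int) else 0)
  | [], d => by simp
  | p :: l, d => by
    rw [List.foldl_cons,
      pv_outer_getD ver l ((PySem.Set.ofList p.2).foldl
        (fun d v => if d.contains v then d.insert v (d.getD v 0 + 1) else d) d),
      pv_inner_getD ver (PySem.Set.ofList p.2) d]
    have hk : ∀ a, ((PySem.Set.ofList p.2).foldl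
        (fun d v => if d.contains v then d.insert v (d.getD v 0 + 1) else d) d).contains a
          = d.contains a := by
      intro a
      rw [PySem.Dict.contains_eq_decide_mem_keys, PySem.Dict.contains_eq_decide_mem_keys,
        pv_inner_keys]
    rw [hk]
    by_cases hc : d.contains ver = true
    · rw [if_pos hc, if_pos hc, if_pos hc]
      have hcnt : ((PySem.Set.ofList p.2).count ver : Int) = if ver ∈ p.2 then 1 else 0 := by
        by_cases hm : ver ∈ p.2
        · rw [if_pos hm]
          have h1 : (PySem.Set.ofList p.2).count ver = 1 :=
            List.count_eq_one_of_mem (PySem.Set.nodup_ofList p.2)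
              ((PySem.Set.mem_ofList p.2 ver).mpr hm)
          rw [h1]; rfl
        · rw [if_neg hm]
          have h0 : (PySem.Set.ofList p.2).count ver = 0 :=
            List.count_eq_zero_of_not_mem (fun h => hm ((PySem.Set.mem_ofList p.2 ver).mp h))
          rw [h0]; rfl
      rw [hcnt, List.countP_cons]
      by_cases hm : ver ∈ p.2 <;> simp [hm] <;> omega
    · rw [if_neg hc, if_neg hc, if_neg hc]
      ring

-- ===== VERDICT (by name: the statement is the Claim_ definition above) =====
theorem grau_vertices_spec : Claim_equal_grau_vertices := by
  intro grafo nd _dom hpre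
  unfold Spec_grau_vertices
  have hks : (grafo.map (fun p => p.1)).Nodup := hpre
  cases nd with
  | true =>
    simp only [grau_vertices, grau_vertices_alt, reduceIte]
    rw [pv_A_items grafo _
        (fun ver i0 =>
          ((i0.insert "In" ((pvListar (PySem.Dict.mk grafo) ver).length : Int)).insert "Out"
              ((pvListar (PySem.Dict.mk grafo) ver).length : Int)).insert "Total"
            ((pvListar (PySem.Dict.mk grafo) ver).length : Int)) hks ?hstepU]
    case hstepU =>
      intro d k _ _
      simp [PySem.Dict.getD_insert_self, PySem.Dict.insert_insert_self, PySem.Dict.getD_insert]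
    apply List.map_congr_left
    intro p hp
    rw [pv_triple_items, pvListar_mem grafo hpre p hp]
  | false =>
    simp only [grau_vertices, grau_vertices_alt, Bool.false_eq_true, if_false]
    rw [pv_A_items grafo _
        (fun ver i0 =>
          ((pvBump^[(grafo.map (fun p => p.1)).countP
              (fun a => decide (ver ∈ pvListar (PySem.Dict.mk grafo) a))] i0).insert "Out"
              ((pvListar (PySem.Dict.mk grafo) ver).length : Int)).insert "Total"
            ((((pvBump^[(grafo.map (fun p => p.1)).countP
                (fun a => decide (ver ∈ pvListar (PySem.Dict.mk grafo) a))] i0).insert "Out"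
                ((pvListar (PySem.Dict.mk grafo) ver).length : Int)).getD "In" 0)
              + (((pvBump^[(grafo.map (fun p => p.1)).countP
                  (fun a => decide (ver ∈ pvListar (PySem.Dict.mk grafo) a))] i0).insert "Out"
                  ((pvListar (PySem.Dict.mk grafo) ver).length : Int)).getD "Out" 0)))
        hks ?hstepD]
    case hstepD =>
      intro d k hnd hc
      rw [pv_incr_loop (PySem.Dict.mk grafo) k (grafo.map (fun p => p.1)) d hnd hc]
      simp only [PySem.Dict.getD_insert_self, PySem.Dict.insert_insert_self]
    -- B side: evaluate the in-degree dictionary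
    have hitems0 : (grafo.foldl (fun d p => d.insert p.1 (0 : Int)) PySem.Dict.empty).items
        = grafo.map (fun p => (p.1, (0 : Int))) := by
      have := PySem.Dict.items_foldl_insert_fresh grafo (fun p => p.1) (fun _ => (0 : Int))
        PySem.Dict.empty (by intro a _; simp) hks
      exact this
    have hkeys0 : (grafo.foldl (fun d p => d.insert p.1 (0 : Int)) PySem.Dict.empty).keys
        = grafo.map (fun p => p.1) := by
      simp only [PySem.Dict.keys, hitems0, List.map_map]
      simp
    apply List.map_congr_left
    intro p hp
    have hmem : p.1 ∈ grafo.map (fun p => p.1) := List.mem_map.mpr ⟨p, hp, rfl⟩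
    have hcon0 : (grafo.foldl (fun d p => d.insert p.1 (0 : Int)) PySem.Dict.empty).contains p.1
        = true := by
      rw [PySem.Dict.contains_eq_decide_mem_keys, hkeys0]; simpa using hmem
    have hgd0 : (grafo.foldl (fun d p => d.insert p.1 (0 : Int)) PySem.Dict.empty).getD p.1 0
        = 0 := by
      refine PySem.Dict.getD_of_mem_items _ ?_ (by rw [hkeys0]; exact hks) 0
      rw [hitems0]
      exact List.mem_map.mpr ⟨p, hp, rfl⟩
    have hindeg : (grafo.foldl (fun d p =>
        (PySem.Set.ofList p.2).foldl
          (fun d v => if d.contains v then d.insert v (d.getD v 0 + 1) else d) d)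
        (grafo.foldl (fun d p => d.insert p.1 (0 : Int)) PySem.Dict.empty)).getD p.1 0
        = (grafo.countP (fun q => decide (p.1 ∈ q.2)) : Int) := by
      rw [pv_outer_getD, hgd0, hcon0]
      simp
    have hcnt : (grafo.map (fun p => p.1)).countP
        (fun a => decide (p.1 ∈ pvListar (PySem.Dict.mk grafo) a))
        = grafo.countP (fun q => decide (p.1 ∈ q.2)) := by
      rw [List.countP_map]
      apply List.countP_congr
      intro q hq
      simp [Function.comp, pvListar_mem grafo hpre q hq]
    rw [pv_dtriple_items, hindeg, hcnt, pvListar_mem grafo hpre p hp]
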